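-- pv_equiv track=rewrite | github.com/macshonle/openword-lexicon | src/openword/merge_all.py | compute_license_sources
-- ===== SOURCE A (Python) =====
-- from typing import Dict, List, Set
--
-- SOURCE_LICENSES = {
--     'enable': 'CC0',
--     'eowl': 'UKACD',
--     'wikt': 'CC-BY-SA-4.0',
--     'wordnet': 'WordNet',
--     'frequency': 'CC-BY-4.0'
-- }
--
-- def compute_license_sources(sources: List[str]) -> Dict[str, List[str]]:
--     """
--     Compute license_sources mapping from sources list.
--
--     Args:
--         sources: List of source identifiers (e.g., ['enable', 'wikt'])
--
--     Returns:
--         Dict mapping license IDs to source lists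
--         e.g., {'CC0': ['enable'], 'CC-BY-SA-4.0': ['wikt']}
--     """
--     license_map = {}
--
--     for source in sources:
--         license_id = SOURCE_LICENSES.get(source)
--         if license_id:
--             license_map.setdefault(license_id, []).append(source)
--
--     # Sort sources within each license for consistency
--     for license_id in license_map:
--         license_map[license_id] = sorted(license_map[license_id])
--
--     return license_map
-- ===== SOURCE B (Python) =====
-- from typing import Dict, List
-- from collections import Counter
--
-- SOURCE_LICENSES = {
--     'enable': 'CC0',
--     'eowl': 'UKACD',
--     'wikt': 'CC-BY-SA-4.0',
--     'wordnet': 'WordNet',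
--     'frequency': 'CC-BY-4.0'
-- }
--
-- def compute_license_sources(sources: List[str]) -> Dict[str, List[str]]:
--     # Count occurrences once; each distinct known source owns its own license,
--     # so every bucket is `count` copies of one string and needs no sorting.
--     counts = Counter(sources)
--     license_map = {}
--     for source, count in counts.items():
--         license_id = SOURCE_LICENSES.get(source)
--         if license_id:
--             license_map.setdefault(license_id, []).extend([source] * count)
--     return license_map
-- ===== Notes on version B (the rewrite author's own statement) =====
-- stated objective: alternative
-- what changed: B counts all sources once with collections.Counter and builds each license bucket in one grouping pass as count copies of its source, eliminating A's per-element appends and A's entire second pass that re-sorts every bucket (each bucket holds copies of a single source, so it is already sorted).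
import Mathlib
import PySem

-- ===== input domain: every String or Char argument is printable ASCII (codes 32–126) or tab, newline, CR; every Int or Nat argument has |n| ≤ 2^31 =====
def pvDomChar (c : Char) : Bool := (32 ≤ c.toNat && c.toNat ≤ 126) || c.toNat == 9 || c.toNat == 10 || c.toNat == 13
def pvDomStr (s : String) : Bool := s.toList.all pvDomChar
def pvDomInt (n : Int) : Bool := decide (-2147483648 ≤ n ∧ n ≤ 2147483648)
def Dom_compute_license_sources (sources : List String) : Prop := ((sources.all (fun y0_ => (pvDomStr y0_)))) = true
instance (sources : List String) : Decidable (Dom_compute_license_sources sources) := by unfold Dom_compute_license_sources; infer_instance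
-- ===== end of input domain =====

-- B builds each license bucket once from a Counter of the sources (count copies of the
-- source) instead of A's per-element appends followed by a re-sort of every bucket.

-- ===== PORT A =====
-- SOURCE_LICENSES module constant (a literal dict)
def SOURCE_LICENSES : PySem.Dict String String :=
  PySem.Dict.mk [("enable", "CC0"), ("eowl", "UKACD"), ("wikt", "CC-BY-SA-4.0"),
                 ("wordnet", "WordNet"), ("frequency", "CC-BY-4.0")]

-- loop body: license_id = SOURCE_LICENSES.get(source); if license_id: license_map.setdefault(license_id, []).append(source)
def pvStepA (m : PySem.Dict String (List String)) (source : String) : PySem.Dict String (List String) :=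
  match SOURCE_LICENSES.get? source with
  | none => m                              -- license_id is None (falsy)
  | some license_id =>
    if license_id = "" then m              -- falsy empty string
    else m.insert license_id (m.getD license_id [] ++ [source])   -- setdefault(…, []).append(source)

-- loop body of the second pass: license_map[license_id] = sorted(license_map[license_id])
def pvSortStep (m : PySem.Dict String (List String)) (license_id : String) : PySem.Dict String (List String) :=
  m.insert license_id (PySem.List.sorted (m.getD license_id []) (fun x => x) false)

def compute_license_sources (sources : List String) : List (String × List String) :=
  let license_map := sources.foldl pvStepA PySem.Dict.empty
  -- for license_id in license_map: license_map[license_id] = sorted(license_map[license_id])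
  let license_map := license_map.keys.foldl pvSortStep license_map
  license_map.items

-- ===== PORT B =====
-- loop body: license_id = SOURCE_LICENSES.get(source); if license_id: license_map.setdefault(license_id, []).extend([source] * count)
def pvStepB (m : PySem.Dict String (List String)) (sc : String × Int) : PySem.Dict String (List String) :=
  match SOURCE_LICENSES.get? sc.1 with
  | none => m
  | some license_id =>
    if license_id = "" then m
    else m.insert license_id (m.getD license_id [] ++ List.replicate sc.2.toNat sc.1)

def compute_license_sources_alt (sources : List String) : List (String × List String) :=
  let counts := PySem.Dict.counter sources
  let license_map := counts.items.foldl pvStepB PySem.Dict.empty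
  license_map.items

-- ===== PRECONDITION & SPEC =====
def Spec_compute_license_sources (sources : List String) (out : List (String × List String)) : Prop := out = compute_license_sources_alt sources
instance (sources : List String) (out : List (String × List String)) : Decidable (Spec_compute_license_sources sources out) := by unfold Spec_compute_license_sources; infer_instance

-- ===== CLAIM (what is proved, stated in full; the proofs are below) =====
def Claim_equal_compute_license_sources : Prop := ∀ (sources : List String), Dom_compute_license_sources sources → Spec_compute_license_sources sources (compute_license_sources sources)

-- ===== LEMMAS AND PROOFS =====

-- the five known source identifiers
def pvSrcs : List String := ["enable", "eowl", "wikt", "wordnet", "frequency"]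

-- the license of a known source
def pvLic (s : String) : String := (SOURCE_LICENSES.get? s).getD ""

theorem pv_get_known (s : String) (h : s ∈ pvSrcs) :
    SOURCE_LICENSES.get? s = some (pvLic s) := by
  simp only [pvSrcs, List.mem_cons, List.not_mem_nil, or_false] at h
  rcases h with h | h | h | h | h <;> subst h <;> decide

theorem pv_get_unknown (s : String) (h : s ∉ pvSrcs) :
    SOURCE_LICENSES.get? s = none := by
  have h1 : "enable" ≠ s := fun e => h (by simp [pvSrcs, ← e])
  have h2 : "eowl" ≠ s := fun e => h (by simp [pvSrcs, ← e])
  have h3 : "wikt" ≠ s := fun e => h (by simp [pvSrcs, ← e])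
  have h4 : "wordnet" ≠ s := fun e => h (by simp [pvSrcs, ← e])
  have h5 : "frequency" ≠ s := fun e => h (by simp [pvSrcs, ← e])
  simp [SOURCE_LICENSES, PySem.Dict.get?_mk_cons, h1, h2, h3, h4, h5]
  rfl

theorem pv_lic_inj (s t : String) (hs : s ∈ pvSrcs) (ht : t ∈ pvSrcs)
    (h : pvLic s = pvLic t) : s = t := by
  simp only [pvSrcs, List.mem_cons, List.not_mem_nil, or_false] at hs ht
  rcases hs with hs | hs | hs | hs | hs <;> rcases ht with ht | ht | ht | ht | ht <;>
    subst hs <;> subst ht <;> first | rfl | exact absurd h (by decide)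

theorem pv_lic_ne (s : String) (h : s ∈ pvSrcs) : pvLic s ≠ "" := by
  simp only [pvSrcs, List.mem_cons, List.not_mem_nil, or_false] at h
  rcases h with h | h | h | h | h <;> subst h <;> decide

-- the distinct known sources of p, in first-occurrence order
def pvK (p : List String) : List String :=
  PySem.Set.ofList (p.filter (fun s => decide (s ∈ pvSrcs)))

-- the common shape of both license maps' items
def pvModel (p : List String) : List (String × List String) :=
  (pvK p).map (fun s => (pvLic s, List.replicate (p.count s) s))

theorem pv_mem_K (p : List String) (s : String) :
    s ∈ pvK p ↔ s ∈ p ∧ s ∈ pvSrcs := by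
  simp [pvK, PySem.Set.mem_ofList, List.mem_filter]

theorem pv_nodup_K (p : List String) : (pvK p).Nodup := PySem.Set.nodup_ofList _

theorem pv_known_K (p : List String) (s : String) (h : s ∈ pvK p) : s ∈ pvSrcs :=
  ((pv_mem_K p s).1 h).2

theorem pv_K_append (p : List String) (s : String) :
    pvK (p ++ [s]) = if s ∈ pvSrcs then (if s ∈ pvK p then pvK p else pvK p ++ [s]) else pvK p := by
  simp only [pvK, List.filter_append]
  by_cases hk : s ∈ pvSrcs
  · simp [hk, PySem.Set.ofList_append, PySem.Set.update_cons, PySem.Set.update_nil,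
          PySem.Set.add, PySem.Set.contains]
  · simp [hk]

theorem pv_nodup_keys (p : List String) : ((pvK p).map pvLic).Nodup :=
  (pv_nodup_K p).map_on (fun s hs t ht h => pv_lic_inj s t (pv_known_K p s hs) (pv_known_K p t ht) h)

theorem pv_count_append_ne (p : List String) (s t : String) (h : t ≠ s) :
    (p ++ [s]).count t = p.count t := by
  have hne : ¬ s = t := fun e => h e.symm
  simp [List.count_append, hne]

-- facts about a dict whose items are pvModel p
theorem pv_keys_of_model (d : PySem.Dict String (List String)) (p : List String)
    (h : d.items = pvModel p) : d.keys = (pvK p).map pvLic := by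
  simp [PySem.Dict.keys, h, pvModel, List.map_map, Function.comp_def]

theorem pv_getD_of_model (d : PySem.Dict String (List String)) (p : List String)
    (h : d.items = pvModel p) (s : String) (hs : s ∈ pvK p) :
    d.getD (pvLic s) [] = List.replicate (p.count s) s := by
  apply PySem.Dict.getD_of_mem_items
  · rw [h]; exact List.mem_map.2 ⟨s, hs, rfl⟩
  · rw [pv_keys_of_model d p h]; exact pv_nodup_keys p

theorem pv_contains_of_model (d : PySem.Dict String (List String)) (p : List String)
    (h : d.items = pvModel p) (s : String) (hs : s ∈ pvK p) :
    d.contains (pvLic s) = true := by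
  rw [PySem.Dict.contains_iff_mem_keys, pv_keys_of_model d p h]
  exact List.mem_map.2 ⟨s, hs, rfl⟩

theorem pv_not_contains_of_model (d : PySem.Dict String (List String)) (p : List String)
    (h : d.items = pvModel p) (s : String) (hk : s ∈ pvSrcs) (hs : s ∉ pvK p) :
    d.contains (pvLic s) = false := by
  rw [← Bool.not_eq_true, PySem.Dict.contains_iff_mem_keys, pv_keys_of_model d p h]
  intro hmem
  rcases List.mem_map.1 hmem with ⟨t, ht, hlt⟩
  exact hs (pv_lic_inj t s (pv_known_K p t ht) hk hlt ▸ ht)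

-- Phase A1: the first loop of A produces pvModel
theorem pv_foldA_items (p : List String) :
    (p.foldl pvStepA PySem.Dict.empty).items = pvModel p := by
  induction p using List.reverseRecOn with
  | nil => rfl
  | append_singleton p s ih =>
    rw [List.foldl_append, List.foldl_cons, List.foldl_nil]
    by_cases hk : s ∈ pvSrcs
    · rw [show pvStepA (p.foldl pvStepA PySem.Dict.empty) s
            = (p.foldl pvStepA PySem.Dict.empty).insert (pvLic s)
                ((p.foldl pvStepA PySem.Dict.empty).getD (pvLic s) [] ++ [s]) by
          simp [pvStepA, pv_get_known s hk, pv_lic_ne s hk]]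
      by_cases hmem : s ∈ pvK p
      · -- existing bucket: the item at key pvLic s gets one more copy of s appended
        rw [PySem.Dict.items_insert_of_contains _ _ (pv_contains_of_model _ p ih s hmem),
            pv_getD_of_model _ p ih s hmem, ih]
        have hKeq : pvK (p ++ [s]) = pvK p := by rw [pv_K_append]; simp [hk, hmem]
        simp only [pvModel, List.map_map, hKeq]
        apply List.map_congr_left
        intro t ht
        simp only [Function.comp_def, beq_iff_eq]
        by_cases hts : t = s
        · subst hts
          have hcnt : (p ++ [t]).count t = p.count t + 1 := by
            simp [List.count_append]
          simp [hcnt, List.replicate_succ']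
        · have hne : pvLic t ≠ pvLic s := fun e =>
            hts (pv_lic_inj t s (pv_known_K p t ht) hk e)
          simp [hne, pv_count_append_ne p s t hts]
      · -- new bucket: appended at the end with the single element [s]
        have hnp : s ∉ p := fun hp => hmem ((pv_mem_K p s).2 ⟨hp, hk⟩)
        have hc := pv_not_contains_of_model _ p ih s hk hmem
        rw [PySem.Dict.items_insert_of_not_contains _ _ hc,
            PySem.Dict.getD_of_not_contains _ _ hc, ih]
        have hKeq : pvK (p ++ [s]) = pvK p ++ [s] := by rw [pv_K_append]; simp [hk, hmem]
        simp only [pvModel, hKeq, List.map_append]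
        congr 1
        · apply List.map_congr_left
          intro t ht
          have hts : t ≠ s := fun e => hmem (e ▸ ht)
          rw [pv_count_append_ne p s t hts]
        · simp [List.count_append, List.count_eq_zero.2 hnp]
    · rw [show pvStepA (p.foldl pvStepA PySem.Dict.empty) s = p.foldl pvStepA PySem.Dict.empty by
            simp [pvStepA, pv_get_unknown s hk]]
      rw [ih]
      have hKeq : pvK (p ++ [s]) = pvK p := by rw [pv_K_append]; simp [hk]
      simp only [pvModel, hKeq]
      apply List.map_congr_left
      intro t ht
      have hts : t ≠ s := fun e => hk (e ▸ pv_known_K p t ht)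
      rw [pv_count_append_ne p s t hts]

-- a fold whose every step fixes d is the identity
theorem pv_foldl_fix {κ δ : Type} (ks : List κ) (f : δ → κ → δ) (d : δ)
    (h : ∀ k ∈ ks, f d k = d) : ks.foldl f d = d := by
  induction ks with
  | nil => rfl
  | cons k ks ih =>
    rw [List.foldl_cons, h k (List.mem_cons_self ..)]
    exact ih (fun k' hk' => h k' (List.mem_cons_of_mem _ hk'))

-- re-inserting a present item is the identity
theorem pv_insert_self (d : PySem.Dict String (List String)) (k : String) (v : List String)
    (hnd : d.keys.Nodup) (h : (k, v) ∈ d.items) : d.insert k v = d := by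
  apply PySem.Dict.ext
  have hc : d.contains k = true :=
    (PySem.Dict.contains_iff_mem_keys d k).2 (PySem.Dict.mem_keys_of_mem_items d h)
  rw [PySem.Dict.items_insert_of_contains _ _ hc]
  have hv : d.get? k = some v := PySem.Dict.get?_of_mem_items d h hnd
  conv_rhs => rw [← List.map_id d.items]
  apply List.map_congr_left
  intro pr hpr
  by_cases hpk : pr.1 = k
  · have : d.get? k = some pr.2 := by
      rw [← hpk]; exact PySem.Dict.get?_of_mem_items d (by simpa using hpr) hnd
    have hv2 : pr.2 = v := by rw [hv] at this; exact (Option.some.inj this).symm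
    simp only [hpk, beq_self_eq_true, if_pos, id_eq]
    rw [← hpk, ← hv2]
  · simp [hpk]

-- Phase A2: the sorting loop is the identity (every bucket is a replicate, already sorted)
theorem pv_sortloop_fix (d : PySem.Dict String (List String)) (p : List String)
    (h : d.items = pvModel p) : d.keys.foldl pvSortStep d = d := by
  apply pv_foldl_fix
  intro k hk
  rw [pv_keys_of_model d p h] at hk
  rcases List.mem_map.1 hk with ⟨s, hs, rfl⟩
  have hgd := pv_getD_of_model d p h s hs
  have hsorted : PySem.List.sorted (List.replicate (p.count s) s) (fun x => x) false
      = List.replicate (p.count s) s :=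
    PySem.List.sorted_eq_self_of_pairwise _ _ List.pairwise_replicate_of_refl
  rw [pvSortStep, hgd, hsorted]
  apply pv_insert_self d _ _ (by rw [pv_keys_of_model d p h]; exact pv_nodup_keys p)
  rw [h]
  exact List.mem_map.2 ⟨s, hs, rfl⟩

theorem pv_portA_model (sources : List String) :
    compute_license_sources sources = pvModel sources := by
  show ((sources.foldl pvStepA PySem.Dict.empty).keys.foldl pvSortStep
          (sources.foldl pvStepA PySem.Dict.empty)).items = pvModel sources
  rw [pv_sortloop_fix _ sources (pv_foldA_items sources)]
  exact pv_foldA_items sources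

-- Phase B: the grouping loop over distinct (source, count) pairs
theorem pv_foldB_items (us : List String) (c : String → Int) (hnd : us.Nodup) :
    ((us.map (fun s => (s, c s))).foldl pvStepB PySem.Dict.empty).items
      = (us.filter (fun s => decide (s ∈ pvSrcs))).map
          (fun s => (pvLic s, List.replicate (c s).toNat s)) := by
  induction us using List.reverseRecOn with
  | nil => rfl
  | append_singleton us s ih =>
    have hnu : us.Nodup := hnd.of_append_left
    have hsu : s ∉ us := by
      intro hmem
      have := List.disjoint_of_nodup_append hnd hmem
      simp at this
    rw [List.map_append, List.foldl_append, List.map_cons, List.map_nil,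
        List.foldl_cons, List.foldl_nil, List.filter_append]
    by_cases hk : s ∈ pvSrcs
    · have hc : ((us.map (fun s => (s, c s))).foldl pvStepB PySem.Dict.empty).contains (pvLic s) = false := by
        rw [← Bool.not_eq_true, PySem.Dict.contains_iff_mem_keys,
            PySem.Dict.keys, ih hnu]
        intro hmem
        simp only [List.map_map, List.mem_map, Function.comp_def] at hmem
        rcases hmem with ⟨t, ht, hlt⟩
        have htu := List.mem_of_mem_filter ht
        have htk : t ∈ pvSrcs := by simpa using (List.of_mem_filter ht)
        exact hsu ((pv_lic_inj t s htk hk hlt) ▸ htu)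
      rw [show pvStepB ((us.map (fun s => (s, c s))).foldl pvStepB PySem.Dict.empty) (s, c s)
            = ((us.map (fun s => (s, c s))).foldl pvStepB PySem.Dict.empty).insert (pvLic s)
                (((us.map (fun s => (s, c s))).foldl pvStepB PySem.Dict.empty).getD (pvLic s) []
                  ++ List.replicate (c s).toNat s) by
          simp [pvStepB, pv_get_known s hk, pv_lic_ne s hk]]
      rw [PySem.Dict.items_insert_of_not_contains _ _ hc,
          PySem.Dict.getD_of_not_contains _ _ hc, ih hnu]
      simp [hk]
    · rw [show pvStepB ((us.map (fun s => (s, c s))).foldl pvStepB PySem.Dict.empty) (s, c s)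
            = (us.map (fun s => (s, c s))).foldl pvStepB PySem.Dict.empty by
          simp [pvStepB, pv_get_unknown s hk]]
      rw [ih hnu]
      simp [hk]

-- dedup commutes with filter
theorem pv_ofList_filter (p : List String) (q : String → Bool) :
    PySem.Set.ofList (p.filter q) = (PySem.Set.ofList p).filter q := by
  induction p using List.reverseRecOn with
  | nil => rfl
  | append_singleton p s ih =>
    by_cases hq : q s
    · by_cases hmem : s ∈ PySem.Set.ofList p
      · have hmf : s ∈ (PySem.Set.ofList p).filter q := List.mem_filter.2 ⟨hmem, hq⟩
        simp [PySem.Set.ofList_append, PySem.Set.update_cons, PySem.Set.update_nil,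
              PySem.Set.add, PySem.Set.contains, List.filter_append, hq, ih, hmem, hmf]
      · have hmf : s ∉ (PySem.Set.ofList p).filter q := fun h => hmem (List.mem_of_mem_filter h)
        simp [PySem.Set.ofList_append, PySem.Set.update_cons, PySem.Set.update_nil,
              PySem.Set.add, PySem.Set.contains, List.filter_append, hq, ih, hmem, hmf]
    · have hq' : q s = false := by simpa using hq
      by_cases hmem : s ∈ PySem.Set.ofList p
      · simp [PySem.Set.ofList_append, PySem.Set.update_cons, PySem.Set.update_nil,
              PySem.Set.add, PySem.Set.contains, List.filter_append, hq', ih, hmem]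
      · simp [PySem.Set.ofList_append, PySem.Set.update_cons, PySem.Set.update_nil,
              PySem.Set.add, PySem.Set.contains, List.filter_append, hq', ih, hmem]

theorem pv_portB_model (sources : List String) :
    compute_license_sources_alt sources = pvModel sources := by
  show ((PySem.Dict.counter sources).items.foldl pvStepB PySem.Dict.empty).items = pvModel sources
  rw [show (PySem.Dict.counter sources).items
        = (PySem.Set.ofList sources).map (fun k => (k, ((sources.count k : Int))))
      from PySem.Dict.items_counter sources]
  rw [pv_foldB_items (PySem.Set.ofList sources) (fun k => (sources.count k : Int))
        (PySem.Set.nodup_ofList sources)]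
  rw [pvModel, pvK, pv_ofList_filter]
  apply List.map_congr_left
  intro t _
  simp

-- ===== VERDICT (by name: the statement is the Claim_ definition above) =====
theorem compute_license_sources_spec : Claim_equal_compute_license_sources := by
  intro sources _
  unfold Spec_compute_license_sources
  rw [pv_portA_model, pv_portB_model]
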